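-- pv_equiv track=rewrite | github.com/ionut-mntn/Problema-UMT-Software | main.py | check_split_list_same_average
-- ===== SOURCE A (Python) =====
-- def check_split_list_same_average(given_arr):
--
--     dim = len(given_arr)
--     if dim < 2:
--         return False
--     if dim == 2:
--         return given_arr[0] == given_arr[1]
--
--     summ = sum(given_arr)
--     half_dim = dim // 2
--
--     for i in range(1,half_dim + 1):
--         if summ * i % dim == 0:
--             return True
--     return False
-- ===== SOURCE B (Python) =====
-- def check_split_list_same_average(given_arr):
--     dim = len(given_arr)
--     if dim < 2:
--         return False
--     if dim == 2:
--         return given_arr[0] == given_arr[1]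
--     summ = sum(given_arr)
--     # smallest i >= 1 with summ*i % dim == 0 is dim // gcd(summ, dim)
--     a, b = abs(summ), dim
--     while b:
--         a, b = b, a % b
--     return dim // a <= dim // 2
-- ===== Notes on version B (the rewrite author's own statement) =====
-- stated objective: faster
-- what changed: The scan over i in range(1, dim//2+1) testing summ*i % dim == 0 is replaced by number theory: the smallest positive i with dim | summ*i is dim // gcd(summ, dim), so B computes one Euclidean gcd and compares dim//gcd <= dim//2.
import Mathlib
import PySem

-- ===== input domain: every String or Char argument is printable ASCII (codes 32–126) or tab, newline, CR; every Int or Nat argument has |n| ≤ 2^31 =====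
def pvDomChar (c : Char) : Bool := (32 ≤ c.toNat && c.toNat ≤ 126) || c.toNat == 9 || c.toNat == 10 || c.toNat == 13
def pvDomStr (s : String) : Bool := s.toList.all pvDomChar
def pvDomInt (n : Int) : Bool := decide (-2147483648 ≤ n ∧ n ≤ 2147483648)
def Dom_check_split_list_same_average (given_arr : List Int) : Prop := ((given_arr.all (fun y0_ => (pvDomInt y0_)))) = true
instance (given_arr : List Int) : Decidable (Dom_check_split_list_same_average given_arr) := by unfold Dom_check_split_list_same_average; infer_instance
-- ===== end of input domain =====

-- B replaces A's scan over range(1, dim//2+1) by one Euclidean gcd: the smallest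
-- positive i with dim | summ*i is dim // gcd(summ, dim)  (objective: faster loop → O(log) gcd).

-- ===== PORT A =====
def check_split_list_same_average (given_arr : List Int) : Bool :=
  let dim : Int := given_arr.length
  if dim < 2 then false
  else if dim = 2 then
    PySem.List.pyGetD given_arr 0 0 == PySem.List.pyGetD given_arr 1 0
  else
    let summ : Int := given_arr.foldl (· + ·) 0
    let half_dim : Int := PySem.Int.floordiv dim 2
    -- for i in range(1, half_dim+1): if summ*i % dim == 0: return True / return False
    (PySem.List.pyRange 1 (half_dim + 1) 1).any
      (fun i => PySem.Int.mod (summ * i) dim == 0)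

-- ===== PORT B =====
-- hand-written Euclidean loop of Source B: while b: a, b = b, a % b
def pvGcdLoop (a b : Nat) : Nat :=
  if h : b = 0 then a else pvGcdLoop b (a % b)
termination_by b
decreasing_by exact Nat.mod_lt _ (Nat.pos_of_ne_zero h)

def check_split_list_same_average_alt (given_arr : List Int) : Bool :=
  let dim : Int := given_arr.length
  if dim < 2 then false
  else if dim = 2 then
    PySem.List.pyGetD given_arr 0 0 == PySem.List.pyGetD given_arr 1 0
  else
    let summ : Int := given_arr.foldl (· + ·) 0
    let g : Int := (pvGcdLoop summ.natAbs given_arr.length : Nat)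
    decide (PySem.Int.floordiv dim g ≤ PySem.Int.floordiv dim 2)

-- ===== PRECONDITION & SPEC =====
def Spec_check_split_list_same_average (given_arr : List Int) (out : Bool) : Prop := out = check_split_list_same_average_alt given_arr
instance (given_arr : List Int) (out : Bool) : Decidable (Spec_check_split_list_same_average given_arr out) := by unfold Spec_check_split_list_same_average; infer_instance

-- ===== CLAIM (what is proved, stated in full; the proofs are below) =====
def Claim_equal_check_split_list_same_average : Prop := ∀ (given_arr : List Int), Dom_check_split_list_same_average given_arr → Spec_check_split_list_same_average given_arr (check_split_list_same_average given_arr)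

-- ===== LEMMAS AND PROOFS =====

theorem pvGcdLoop_eq_gcd (a b : Nat) : pvGcdLoop a b = Nat.gcd a b := by
  induction b using Nat.strong_induction_on generalizing a with
  | _ b ih =>
    rw [pvGcdLoop]
    split
    · simp [*]
    · rename_i h
      rw [ih (a % b) (Nat.mod_lt _ (Nat.pos_of_ne_zero h)) b]
      rw [Nat.gcd_comm a b, Nat.gcd_rec b a, Nat.gcd_comm (a % b) b]

-- core number theory: for n > 0 there is j with 1 ≤ j ≤ H and n ∣ a*j iff n / gcd a n ≤ H
theorem key_nat (a n H : ℕ) (hn : 0 < n) :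
    (∃ j : ℕ, 1 ≤ j ∧ j ≤ H ∧ n ∣ a * j) ↔ n / Nat.gcd a n ≤ H := by
  set g := Nat.gcd a n with hg
  have hgpos : 0 < g := Nat.gcd_pos_of_pos_right a hn
  have hgn : g ∣ n := Nat.gcd_dvd_right a n
  have hga : g ∣ a := Nat.gcd_dvd_left a n
  set m := n / g with hm
  have hmn : n = g * m := (Nat.mul_div_cancel' hgn).symm
  have hmpos : 0 < m := Nat.div_pos (Nat.le_of_dvd hn hgn) hgpos
  have hcop : Nat.Coprime (a / g) m := Nat.coprime_div_gcd_div_gcd hgpos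
  have hdvd : ∀ j : ℕ, n ∣ a * j ↔ m ∣ j := by
    intro j
    constructor
    · intro h
      have ha : a = g * (a / g) := (Nat.mul_div_cancel' hga).symm
      rw [hmn, ha, Nat.mul_assoc] at h
      have h2 : m ∣ (a / g) * j := (Nat.mul_dvd_mul_iff_left hgpos).mp h
      exact (Nat.Coprime.dvd_of_dvd_mul_left (Nat.Coprime.symm hcop)) h2
    · rintro ⟨k, rfl⟩
      have ha : a = g * (a / g) := (Nat.mul_div_cancel' hga).symm
      refine ⟨(a / g) * k, ?_⟩
      calc a * (m * k) = (g * (a / g)) * (m * k) := by rw [← ha]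
        _ = (g * m) * ((a / g) * k) := by ring
        _ = n * ((a / g) * k) := by rw [← hmn]
  constructor
  · rintro ⟨j, h1, h2, h3⟩
    have := (hdvd j).mp h3
    exact le_trans (Nat.le_of_dvd (lt_of_lt_of_le h1 (le_refl j)) this) h2
  · intro h
    exact ⟨m, hmpos, h, (hdvd m).mpr dvd_rfl⟩

theorem check_split_list_same_average_spec : Claim_equal_check_split_list_same_average := by
  intro xs _
  unfold Spec_check_split_list_same_average check_split_list_same_average check_split_list_same_average_alt
  by_cases h2 : (xs.length : Int) < 2
  · simp [h2]
  · by_cases he : (xs.length : Int) = 2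
    · simp [he]
    · simp only [h2, he, if_false]
      set n := xs.length with hn
      have hn3 : 3 ≤ n := by omega
      set s : Int := xs.foldl (· + ·) 0 with hs
      rw [pvGcdLoop_eq_gcd]
      set g := Nat.gcd s.natAbs n with hg
      have hgpos : 0 < g := Nat.gcd_pos_of_pos_right _ (by omega)
      -- rewrite the floordivs as Nat division
      have hfd2 : PySem.Int.floordiv (n : Int) 2 = ((n / 2 : Nat) : Int) := by
        exact_mod_cast PySem.Int.floordiv_natCast n 2
      have hfdg : PySem.Int.floordiv (n : Int) (g : Int) = ((n / g : Nat) : Int) :=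
        PySem.Int.floordiv_natCast n g
      rw [hfd2, hfdg]
      have hwdvd : (n : Int) ∣ s * ((n / g : Nat) : Int) := by
        have hdvd : n ∣ s.natAbs * (n / g) := by
          have hga : g ∣ s.natAbs := Nat.gcd_dvd_left _ _
          have hgn : g ∣ n := Nat.gcd_dvd_right _ _
          refine ⟨(s.natAbs / g), ?_⟩
          calc s.natAbs * (n / g) = (g * (s.natAbs / g)) * (n / g) := by
                rw [Nat.mul_div_cancel' hga]
            _ = (g * (n / g)) * (s.natAbs / g) := by ring
            _ = n * (s.natAbs / g) := by rw [Nat.mul_div_cancel' hgn]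
        have h1 : (s * ((n / g : Nat) : Int)).natAbs = s.natAbs * (n / g) := by
          rw [Int.natAbs_mul, Int.natAbs_natCast]
        exact Int.natCast_dvd.mpr (by rw [h1]; exact hdvd)
      have hwpos : 0 < n / g := Nat.div_pos (Nat.le_of_dvd (by omega) (Nat.gcd_dvd_right _ _)) hgpos
      rcases Bool.eq_false_or_eq_true ((PySem.List.pyRange 1 (((n / 2 : Nat) : Int) + 1) 1).any
          (fun i => PySem.Int.mod (s * i) (n : Int) == 0)) with hany | hany <;> rw [hany]
      · -- the scan found some i, so n/g ≤ i ≤ n/2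
        symm
        rw [decide_eq_true_eq]
        rw [List.any_eq_true] at hany
        rcases hany with ⟨i, hi, hp⟩
        rw [PySem.List.mem_pyRange_one] at hi
        simp only [beq_iff_eq] at hp
        rw [PySem.Int.mod_eq_zero_iff_dvd _ _] at hp
        have hnat : n ∣ s.natAbs * i.toNat := by
          have h2 : (s * i).natAbs = s.natAbs * i.toNat := by
            rw [Int.natAbs_mul]; congr 1; omega
          have := Int.natAbs_dvd_natAbs.mpr hp
          simpa [h2] using this
        have hml : n / g ≤ n / 2 := by
          apply (key_nat s.natAbs n (n / 2) (by omega)).mp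
          exact ⟨i.toNat, by omega, by omega, hnat⟩
        exact_mod_cast hml
      · -- the scan found nothing, so n/g > n/2
        symm
        rw [decide_eq_false_iff_not]
        intro hle
        rw [List.any_eq_false] at hany
        refine hany ((n / g : Nat) : Int) ?_ ?_
        · rw [PySem.List.mem_pyRange_one]
          have hml : n / g ≤ n / 2 := by exact_mod_cast hle
          exact ⟨by exact_mod_cast hwpos, by push_cast; omega⟩
        · simp only [beq_iff_eq]
          rw [PySem.Int.mod_eq_zero_iff_dvd _ _]
          exact hwdvd
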